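-- pv_equiv track=rewrite | github.com/Coupin82/inversiones-cartera | informe_inversor_diario.py | _split_markdown_safe
-- ===== SOURCE A (Python) =====
-- def _split_markdown_safe(text: str, max_len: int) -> list[str]:
--     lines = (text or "").splitlines(True)
--     chunks = []
--     buf = ""
--     in_code = False
--
--     def is_fence(line: str) -> bool:
--         return line.lstrip().startswith("```")
--
--     for line in lines:
--         if is_fence(line):
--             in_code = not in_code
--
--         if len(buf) + len(line) > max_len:
--             if in_code:
--                 if buf:
--                     chunks.append(buf.rstrip("\n"))
--                     buf = ""
--                 buf += line
--             else:
--                 if buf: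
--                     chunks.append(buf.rstrip("\n"))
--                 buf = line
--         else:
--             buf += line
--
--     if buf.strip():
--         chunks.append(buf.rstrip("\n"))
--
--     return chunks
-- ===== SOURCE B (Python) =====
-- def _split_markdown_safe(text: str, max_len: int) -> list[str]:
--     # Chunk-at-a-time: an inner scan measures how many whole lines fit in the
--     # next chunk, then the chunk is joined once from that slice; no running
--     # character buffer and no (dead) code-fence state.
--     rest = (text or "").splitlines(True)
--     chunks = []
--     while rest:
--         taken = [rest[0]]
--         total = len(rest[0])
--         rest = rest[1:]
--         while rest and total + len(rest[0]) <= max_len: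
--             total += len(rest[0])
--             taken.append(rest[0])
--             rest = rest[1:]
--         piece = "".join(taken)
--         if rest or piece.strip():
--             chunks.append(piece.rstrip("\n"))
--     return chunks
-- ===== Notes on version B (the rewrite author's own statement) =====
-- stated objective: alternative
-- what changed: A's flat single pass that grows a character buffer line by line under a (dead) code-fence state machine is replaced by a chunk-at-a-time nested loop: an inner scan counts how many whole lines fit into the next chunk by summing line lengths, then that group of lines is joined once into the chunk; no fence state and no incremental string buffer.
import Mathlib
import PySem

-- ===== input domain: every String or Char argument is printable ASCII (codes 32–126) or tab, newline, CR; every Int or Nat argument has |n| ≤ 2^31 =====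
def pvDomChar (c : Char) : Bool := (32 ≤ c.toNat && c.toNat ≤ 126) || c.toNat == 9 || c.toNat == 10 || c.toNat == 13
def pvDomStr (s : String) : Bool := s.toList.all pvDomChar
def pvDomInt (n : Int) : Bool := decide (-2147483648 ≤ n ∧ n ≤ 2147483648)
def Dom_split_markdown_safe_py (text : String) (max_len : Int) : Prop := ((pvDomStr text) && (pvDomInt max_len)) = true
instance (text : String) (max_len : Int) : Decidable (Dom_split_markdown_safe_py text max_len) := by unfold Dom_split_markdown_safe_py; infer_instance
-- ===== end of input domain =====

-- B replaces A's flat buffer-growing pass (with its dead code-fence state) by a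
-- chunk-at-a-time nested loop: the inner scan collects the lines that fit, the chunk
-- is joined once from that group; objective: alternative decomposition, same cost.

-- shared helpers: hand ports of Python string operations both sources use
-- s.rstrip("\n"): drop trailing '\n' characters (exact)
def pvRstripNl (cs : List Char) : List Char := (cs.reverse.dropWhile (fun c => c = '\n')).reverse

-- s.splitlines(True) (keepends): exact on the stated domain, where the only line
-- breaks are '\n', '\r' and the pair '\r\n' (no \x0b/\x0c/\x1c-\x1e/U+85/U+2028/U+2029)
def pvSplitKeep : List Char → List Char → List (List Char)
  | [], acc => if acc.isEmpty then [] else [acc.reverse]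
  | '\r' :: '\n' :: rest, acc => (acc.reverse ++ ['\r', '\n']) :: pvSplitKeep rest []
  | c :: rest, acc =>
      if c = '\n' ∨ c = '\r' then (acc.reverse ++ [c]) :: pvSplitKeep rest []
      else pvSplitKeep rest (c :: acc)

-- ===== PORT A =====
-- is_fence(line) = line.lstrip().startswith("```")
def pvIsFence (line : List Char) : Bool :=
  PySem.Chars.startswith (PySem.Chars.lstrip line) ['`', '`', '`']

-- loop body of A: state (chunks, buf, in_code)
def pvStepA (max_len : Int) (st : List (List Char) × List Char × Bool) (line : List Char) :
    List (List Char) × List Char × Bool :=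
  let inc := if pvIsFence line then !st.2.2 else st.2.2
  if ((st.2.1.length : Int) + (line.length : Int) > max_len) then
    if inc then
      if st.2.1.isEmpty then (st.1, ([] : List Char) ++ line, inc)
      else (st.1 ++ [pvRstripNl st.2.1], ([] : List Char) ++ line, inc)
    else
      if st.2.1.isEmpty then (st.1, line, inc)
      else (st.1 ++ [pvRstripNl st.2.1], line, inc)
  else (st.1, st.2.1 ++ line, inc)

def split_markdown_safe_py (text : String) (max_len : Int) : List String :=
  let lines := pvSplitKeep text.toList []
  let st := lines.foldl (pvStepA max_len) ([], [], false)
  let chunks := if (PySem.Chars.strip st.2.1).isEmpty then st.1 else st.1 ++ [pvRstripNl st.2.1]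
  chunks.map String.ofList

-- ===== PORT B =====
-- inner while loop of B over (taken, total, rest); returns (taken, rest)
def pvInner (m : Int) : List (List Char) → List (List Char) → Int → (List (List Char) × List (List Char))
  | [], taken, _ => (taken, [])
  | x :: rs, taken, total =>
      if (total + (x.length : Int)) ≤ m then pvInner m rs (taken ++ [x]) (total + x.length)
      else (taken, x :: rs)

-- needed by pvOuter's termination: the leftover rest never grows
lemma pvInner_snd_le (m : Int) : ∀ (rest taken : List (List Char)) (total : Int),
    (pvInner m rest taken total).2.length ≤ rest.length := by
  intro rest
  induction rest with
  | nil => intro taken total; simp [pvInner]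
  | cons x rs ih =>
      intro taken total
      unfold pvInner
      split
      · exact Nat.le_succ_of_le (ih _ _)
      · simp

-- outer while loop of B over (chunks, rest); piece = join of the taken lines
def pvOuter (m : Int) (chunks : List (List Char)) : List (List Char) → List (List Char)
  | [] => chunks
  | l :: rs =>
      pvOuter m
        (if ¬ (pvInner m rs [l] (l.length : Int)).2.isEmpty
            ∨ ¬ (PySem.Chars.strip (pvInner m rs [l] (l.length : Int)).1.flatten).isEmpty
         then chunks ++ [pvRstripNl (pvInner m rs [l] (l.length : Int)).1.flatten] else chunks)
        (pvInner m rs [l] (l.length : Int)).2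
  termination_by rest => rest.length
  decreasing_by exact Nat.lt_succ_of_le (pvInner_snd_le m rs [l] _)

def split_markdown_safe_py_alt (text : String) (max_len : Int) : List String :=
  (pvOuter max_len [] (pvSplitKeep text.toList [])).map String.ofList

-- ===== PRECONDITION & SPEC =====
def Spec_split_markdown_safe_py (text : String) (max_len : Int) (out : List String) : Prop := out = split_markdown_safe_py_alt text max_len
instance (text : String) (max_len : Int) (out : List String) : Decidable (Spec_split_markdown_safe_py text max_len out) := by unfold Spec_split_markdown_safe_py; infer_instance

-- ===== CLAIM (what is proved, stated in full; the proofs are below) =====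
def Claim_equal_split_markdown_safe_py : Prop := ∀ (text : String) (max_len : Int), Dom_split_markdown_safe_py text max_len → Spec_split_markdown_safe_py text max_len (split_markdown_safe_py text max_len)

-- ===== LEMMAS AND PROOFS =====

-- proof-side view of A without the (dead) fence flag: flat flush-then-append step
def pvStepFlat (m : Int) (st : List (List Char) × List Char) (line : List Char) :
    List (List Char) × List Char :=
  if ¬ st.2.isEmpty ∧ ((st.2.length : Int) + (line.length : Int) > m) then
    (st.1 ++ [pvRstripNl st.2], line)
  else (st.1, st.2 ++ line)

def pvFinalize (st : List (List Char) × List Char) : List (List Char) :=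
  if (PySem.Chars.strip st.2).isEmpty then st.1 else st.1 ++ [pvRstripNl st.2]

lemma pvStepFlat_fit (m : Int) (C : List (List Char)) (buf x : List Char)
    (h : (buf.length : Int) + (x.length : Int) ≤ m) :
    pvStepFlat m (C, buf) x = (C, buf ++ x) := by
  simp only [pvStepFlat]
  rw [if_neg]
  intro hh
  exact absurd hh.2 (by omega)

lemma pvStepFlat_over (m : Int) (C : List (List Char)) (buf x : List Char)
    (hb : buf ≠ []) (h : m < (buf.length : Int) + (x.length : Int)) :
    pvStepFlat m (C, buf) x = (C ++ [pvRstripNl buf], x) := by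
  simp only [pvStepFlat]
  rw [if_pos ⟨by simp [hb], by omega⟩]

lemma pvStepFlat_empty (m : Int) (C : List (List Char)) (x : List Char) :
    pvStepFlat m (C, []) x = (C, x) := by
  simp [pvStepFlat]

lemma pvFinalize_nil (C : List (List Char)) : pvFinalize (C, []) = C := by
  have h : (PySem.Chars.strip ([] : List Char)).isEmpty = true := by decide
  simp [pvFinalize, h]

-- one step of A projects (forgetting the fence flag) to one flat step
lemma pvStepA_proj (m : Int) (st : List (List Char) × List Char × Bool) (line : List Char) :
    ((pvStepA m st line).1, (pvStepA m st line).2.1) = pvStepFlat m (st.1, st.2.1) line := by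
  unfold pvStepA pvStepFlat
  by_cases hb : st.2.1.isEmpty
  · have hnil : st.2.1 = [] := List.isEmpty_iff.mp hb
    simp [hnil]
  · by_cases ho : ((st.2.1.length : Int) + (line.length : Int) > m) <;>
      simp [hb, ho]

-- the whole fold projects
lemma pvFold_proj (m : Int) (lines : List (List Char)) (st : List (List Char) × List Char × Bool) :
    ((lines.foldl (pvStepA m) st).1, (lines.foldl (pvStepA m) st).2.1)
      = lines.foldl (pvStepFlat m) (st.1, st.2.1) := by
  induction lines generalizing st with
  | nil => rfl
  | cons l ls ih =>
      simp only [List.foldl_cons]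
      rw [ih (pvStepA m st l), pvStepA_proj]

-- splitlines(True) never yields an empty line
lemma pvSplitKeep_ne_nil : ∀ (cs acc : List Char), ∀ l ∈ pvSplitKeep cs acc, l ≠ [] := by
  intro cs acc
  induction cs, acc using pvSplitKeep.induct <;>
    (intro l hl; simp only [pvSplitKeep] at hl) <;>
    first
      | (split at hl <;> simp_all <;> rcases hl with h | h <;> simp_all)
      | (simp_all; try (rcases hl with h | h <;> simp_all))

-- running the flat steps over rs from buffer taken.flatten equals finishing the inner
-- scan and continuing the outer loop; SIH is the main property for shorter line lists,
-- used at the flush point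
lemma pvInner_sim (m : Int) (N : Nat)
    (SIH : ∀ lines : List (List Char), lines.length ≤ N → (∀ l ∈ lines, l ≠ []) →
      ∀ C, pvFinalize (lines.foldl (pvStepFlat m) (C, [])) = pvOuter m C lines) :
    ∀ (rs taken : List (List Char)) (total : Int) (C : List (List Char)),
      total = (taken.flatten.length : Int) → taken.flatten ≠ [] →
      (∀ x ∈ rs, x ≠ []) → rs.length ≤ N →
      pvFinalize (rs.foldl (pvStepFlat m) (C, taken.flatten)) =
        pvOuter m
          (if ¬ (pvInner m rs taken total).2.isEmpty
              ∨ ¬ (PySem.Chars.strip (pvInner m rs taken total).1.flatten).isEmpty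
           then C ++ [pvRstripNl (pvInner m rs taken total).1.flatten] else C)
          (pvInner m rs taken total).2 := by
  intro rs
  induction rs with
  | nil =>
      intro taken total C _ _ _ _
      simp only [pvInner, List.foldl_nil, pvOuter, List.isEmpty_nil]
      unfold pvFinalize
      by_cases hs : (PySem.Chars.strip taken.flatten).isEmpty <;> simp [hs]
  | cons x rs' ih =>
      intro taken total C htot hbuf hne hlen
      have hx : x ≠ [] := hne x (by simp)
      simp only [List.foldl_cons]
      by_cases hfit : (total + (x.length : Int)) ≤ m
      · -- fits: keep accumulating
        rw [pvStepFlat_fit m C taken.flatten x (by rw [htot] at hfit; omega)]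
        have hflat : (taken ++ [x]).flatten = taken.flatten ++ x := by
          simp
        have htot' : total + (x.length : Int) = (((taken ++ [x]).flatten).length : Int) := by
          rw [hflat]; rw [htot]; push_cast [List.length_append]; ring
        have h := ih (taken ++ [x]) (total + (x.length : Int)) C htot'
          (by rw [hflat]; simp [hbuf])
          (fun y hy => hne y (by simp [hy])) (Nat.le_of_succ_le hlen)
        rw [hflat] at h
        rw [h]
        have hunf : pvInner m (x :: rs') taken total
            = pvInner m rs' (taken ++ [x]) (total + (x.length : Int)) := by
          simp only [pvInner]
          rw [if_pos hfit]
        rw [hunf]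
      · -- overflow: flush and restart the outer loop on x :: rs'
        rw [pvStepFlat_over m C taken.flatten x hbuf (by rw [htot] at hfit; omega)]
        have hfirst := pvStepFlat_empty m (C ++ [pvRstripNl taken.flatten]) x
        have hmain := SIH (x :: rs') hlen hne (C ++ [pvRstripNl taken.flatten])
        simp only [List.foldl_cons, hfirst] at hmain
        rw [hmain]
        have hunf : pvInner m (x :: rs') taken total = (taken, x :: rs') := by
          simp only [pvInner]
          rw [if_neg hfit]
        rw [hunf]
        rw [if_pos (Or.inl (by simp))]

-- main simulation: the flat fold, finalized, is the outer loop
lemma pvMain (m : Int) : ∀ (N : Nat) (lines : List (List Char)), lines.length ≤ N →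
    (∀ l ∈ lines, l ≠ []) → ∀ C,
    pvFinalize (lines.foldl (pvStepFlat m) (C, [])) = pvOuter m C lines := by
  intro N
  induction N with
  | zero =>
      intro lines hlen _ C
      have : lines = [] := List.eq_nil_of_length_eq_zero (Nat.le_zero.mp hlen)
      subst this
      simp only [List.foldl_nil, pvOuter]
      exact pvFinalize_nil C
  | succ n ih =>
      intro lines hlen hne C
      cases lines with
      | nil =>
          simp only [List.foldl_nil, pvOuter]
          exact pvFinalize_nil C
      | cons l rs =>
          have hl : l ≠ [] := hne l (by simp)
          have hfirst := pvStepFlat_empty m C l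
          simp only [List.foldl_cons, hfirst]
          have hflat : ([l] : List (List Char)).flatten = l := by simp
          have h := pvInner_sim m n ih rs [l] (l.length : Int) C
            (by rw [hflat]) (by rw [hflat]; exact hl)
            (fun y hy => hne y (by simp [hy])) (Nat.le_of_succ_le_succ hlen)
          rw [hflat] at h
          rw [h]
          conv_rhs => rw [pvOuter]

-- ===== VERDICT (by name: the statement is the Claim_ definition above) =====
theorem split_markdown_safe_py_spec : Claim_equal_split_markdown_safe_py := by
  intro text max_len _
  unfold Spec_split_markdown_safe_py split_markdown_safe_py split_markdown_safe_py_alt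
  simp only []
  have hproj := pvFold_proj max_len (pvSplitKeep text.toList []) ([], [], false)
  have hmain := pvMain max_len (pvSplitKeep text.toList []).length (pvSplitKeep text.toList [])
    (le_refl _) (pvSplitKeep_ne_nil text.toList []) []
  rw [← hmain]
  unfold pvFinalize
  rw [← hproj]
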